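-- pv_equiv track=rewrite | github.com/mahyarkermani1/NetGlimpse | netglimpse.py | parse_targets_from_list
-- ===== SOURCE A (Python) =====
-- from typing import Dict, List, Tuple, Optional
--
-- def parse_targets_from_list(raw_tokens: List[str]) -> List[str]:
--     """
--     Normalize a list of input tokens into a flat list of IP/CIDR strings.
--     Each token may contain commas and arbitrary spaces, so split on commas
--     and trim whitespace. Empty items are ignored.
--
--     Example handled forms:
--       - ['103.4.197.120/29,', '208.68.244.0/22']
--       - ['103.4.197.120/29,208.68.244.0/22']
--       - ['103.4.197.120/29,', '208.68.244.0/22', '1.2.3.4']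
--       - ['103.4.197.120/29, 208.68.244.0/22']
--     """
--     targets: List[str] = []
--     for tok in raw_tokens:
--         parts = tok.split(',')
--         for p in parts:
--             item = p.strip()
--             if item:
--                 targets.append(item)
--     return targets
-- ===== SOURCE B (Python) =====
-- def parse_targets_from_list(raw_tokens):
--     """Single character-level streaming tokenizer: never calls split or strip.
--     Builds each item directly; leading whitespace is skipped, whitespace after
--     the item is buffered and flushed only when more non-space text follows,
--     and ',' terminates the current item."""
--     results = []
--     for tok in raw_tokens:
--         cur = []    # chars of the item in progress (no leading/trailing ws)
--         pend = []   # whitespace seen after cur, flushed only if text follows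
--         for ch in tok:
--             if ch == ',':
--                 if cur:
--                     results.append(''.join(cur))
--                 cur, pend = [], []
--             elif ch.isspace():
--                 if cur:
--                     pend.append(ch)
--             else:
--                 cur.extend(pend)
--                 cur.append(ch)
--                 pend = []
--         if cur:
--             results.append(''.join(cur))
--     return results
-- ===== Notes on version B (the rewrite author's own statement) =====
-- stated objective: alternative
-- what changed: Replaces split-then-strip (split each token on ',' and strip each part) by a single character-level streaming state machine that never splits or strips: it builds each item char by char, skipping leading whitespace, buffering pending whitespace and flushing it only when more text follows, emitting on ',' or end of token.
import Mathlib
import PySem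

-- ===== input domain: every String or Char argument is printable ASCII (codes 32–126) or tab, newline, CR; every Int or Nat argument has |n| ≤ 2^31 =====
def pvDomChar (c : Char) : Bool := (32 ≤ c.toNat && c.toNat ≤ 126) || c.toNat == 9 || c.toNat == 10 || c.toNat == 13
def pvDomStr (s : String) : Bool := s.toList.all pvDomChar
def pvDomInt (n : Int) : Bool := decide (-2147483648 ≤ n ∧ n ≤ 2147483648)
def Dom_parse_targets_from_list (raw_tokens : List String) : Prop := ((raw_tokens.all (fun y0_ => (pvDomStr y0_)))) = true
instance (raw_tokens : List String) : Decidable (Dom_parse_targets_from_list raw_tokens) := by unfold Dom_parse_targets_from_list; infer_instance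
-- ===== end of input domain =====

-- B replaces A's split-then-strip loops by a character-level streaming state machine (alternative algorithm, same cost).


-- ===== PORT A =====
-- tok.split(',') with the nonempty literal separator: PySem.Chars.splitOn on the code points (exact; Str.split? with sep = "," is `some` of this).
def parse_targets_from_list (raw_tokens : List String) : List String :=
  raw_tokens.foldl (fun targets tok =>
    let parts : List String := (PySem.Chars.splitOn tok.toList ",".toList).map String.ofList
    parts.foldl (fun targets p =>
      let item := PySem.Str.strip p
      if item != "" then targets ++ [item] else targets) targets) []

-- ===== PORT B =====
-- the body of Source B's inner per-character loop (named for the proofs; the three branches in order)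
def pystepB (st : List String × List Char × List Char) (ch : Char) :
    List String × List Char × List Char :=
  let (results, cur, pend) := st
  if ch = ',' then
    ((if cur ≠ [] then results ++ [String.ofList cur] else results), [], [])
  else if PySem.Chars.isspace ch then
    (results, cur, if cur ≠ [] then pend ++ [ch] else pend)
  else
    (results, cur ++ pend ++ [ch], [])

def parse_targets_from_list_alt (raw_tokens : List String) : List String :=
  raw_tokens.foldl (fun results tok =>
    let st := tok.toList.foldl pystepB (results, [], [])
    if st.2.1 ≠ [] then st.1 ++ [String.ofList st.2.1] else st.1) []

-- ===== PRECONDITION & SPEC =====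
def Spec_parse_targets_from_list (raw_tokens : List String) (out : List String) : Prop := out = parse_targets_from_list_alt raw_tokens
instance (raw_tokens : List String) (out : List String) : Decidable (Spec_parse_targets_from_list raw_tokens out) := by unfold Spec_parse_targets_from_list; infer_instance

-- ===== CLAIM (what is proved, stated in full; the proofs are below) =====
def Claim_equal_parse_targets_from_list : Prop := ∀ (raw_tokens : List String), Dom_parse_targets_from_list raw_tokens → Spec_parse_targets_from_list raw_tokens (parse_targets_from_list raw_tokens)

-- ===== LEMMAS AND PROOFS =====

-- structural single-character split on ','
def split1 : List Char → List (List Char)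
  | [] => [[]]
  | c :: r =>
    if c = ',' then [] :: split1 r
    else
      match split1 r with
      | [] => [[c]]
      | h :: t => (c :: h) :: t

theorem split1_ne_nil (l : List Char) : split1 l ≠ [] := by
  cases l with
  | nil => simp [split1]
  | cons c r =>
    simp only [split1]
    split_ifs
    · simp
    · cases h : split1 r <;> simp

theorem go_spec (fuel : Nat) (l cur : List Char) (acc : List (List Char))
    (h : l.length < fuel) :
    PySem.Chars.splitOn.go [','] fuel l cur acc =
      acc.reverse ++ (match split1 l with
        | [] => [cur.reverse]
        | hd :: t => (cur.reverse ++ hd) :: t) := by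
  induction fuel generalizing l cur acc with
  | zero => omega
  | succ fuel ih =>
    cases l with
    | nil => simp [PySem.Chars.splitOn.go, split1]
    | cons c rest =>
      by_cases hc : c = ','
      · subst hc
        have hpre : List.isPrefixOf [','] (',' :: rest) = true := by
          simp [List.isPrefixOf]
        rw [PySem.Chars.splitOn.go]
        simp only [hpre, if_true, List.length_cons, List.length_nil, Nat.zero_add,
          List.drop_succ_cons, List.drop_zero] at *
        rw [ih rest [] ((cur.reverse) :: acc) (by omega)]
        cases hs : split1 rest with
        | nil => exact absurd hs (split1_ne_nil rest)
        | cons hd t => simp [split1, hs]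
      · have hpre : List.isPrefixOf [','] (c :: rest) = false := by
          simp only [List.isPrefixOf]
          simp only [Bool.and_eq_false_iff, beq_eq_false_iff_ne, ne_eq]
          exact Or.inl fun h => hc h.symm
        rw [PySem.Chars.splitOn.go]
        simp only [hpre, Bool.false_eq_true, if_false]
        rw [ih rest (c :: cur) acc (by simp at h; omega)]
        cases hs : split1 rest with
        | nil => exact absurd hs (split1_ne_nil rest)
        | cons hd t => simp [split1, hs, hc]

theorem splitOn_comma (l : List Char) : PySem.Chars.splitOn l [','] = split1 l := by
  unfold PySem.Chars.splitOn
  rw [go_spec l.length.succ l [] [] (Nat.lt_succ_self _)]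
  cases hs : split1 l with
  | nil => exact absurd hs (split1_ne_nil l)
  | cons hd t => simp

-- the strip-and-keep pass that characterises A's per-token work
def keepF (ps : List (List Char)) : List String :=
  ((ps.map String.ofList).map PySem.Str.strip).filter (fun item => item != "")

theorem inner_foldl (ps : List (List Char)) (acc : List String) :
    ((ps.map String.ofList).foldl (fun targets p =>
      let item := PySem.Str.strip p
      if item != "" then targets ++ [item] else targets) acc) = acc ++ keepF ps := by
  simp only [keepF]
  rw [PySem.List.foldl_append_if (fun p => PySem.Str.strip p != "") PySem.Str.strip]
  simp only [List.filter_map]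
  rfl

theorem A_eq (ts : List String) :
    parse_targets_from_list ts = ts.flatMap (fun t => keepF (split1 t.toList)) := by
  unfold parse_targets_from_list
  have hsep : (",").toList = [','] := rfl
  simp only [hsep, inner_foldl]
  rw [PySem.List.foldl_append_eq_flatMap]
  simp [splitOn_comma]

-- ---- B-side characterisation ----

-- the per-character step on the (cur, pend) component, for non-comma chars
def cstep (st : List Char × List Char) (c : Char) : List Char × List Char :=
  if PySem.Chars.isspace c then (st.1, if st.1 ≠ [] then st.2 ++ [c] else st.2)
  else (st.1 ++ st.2 ++ [c], [])

def emitPart (cur : List Char) : List String :=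
  if cur ≠ [] then [String.ofList cur] else []

-- rstrip of a list ending in whitespace-only suffix
theorem rstrip_append_ws (a b : List Char) (hb : b.all PySem.Chars.isspace) :
    PySem.Chars.rstrip (a ++ b) = PySem.Chars.rstrip a := by
  unfold PySem.Chars.rstrip
  rw [List.reverse_append, List.dropWhile_append]
  have : b.reverse.dropWhile PySem.Chars.isspace = [] := by
    rw [List.dropWhile_eq_nil_iff]
    intro x hx
    exact (List.all_eq_true.mp hb) x (List.mem_reverse.mp hx)
  simp [this]

theorem rstrip_append_nonws (a : List Char) (c : Char) (hc : ¬ PySem.Chars.isspace c) :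
    PySem.Chars.rstrip (a ++ [c]) = a ++ [c] := by
  unfold PySem.Chars.rstrip
  rw [List.reverse_append]
  simp [hc]

-- main inner invariant: fold of cstep computes rstrip once an item has started
theorem cstep_run (q cur pend : List Char) (hcur : cur ≠ [])
    (hr : PySem.Chars.rstrip cur = cur) (hp : pend.all PySem.Chars.isspace) :
    (q.foldl cstep (cur, pend)).1 = PySem.Chars.rstrip (cur ++ pend ++ q) := by
  induction q generalizing cur pend with
  | nil =>
    simp only [List.foldl_nil, List.append_nil]
    rw [rstrip_append_ws cur pend hp, hr]
  | cons c q' ih =>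
    by_cases hc : PySem.Chars.isspace c
    · have : cstep (cur, pend) c = (cur, pend ++ [c]) := by
        simp [cstep, hc, hcur]
      rw [List.foldl_cons, this, ih cur (pend ++ [c]) hcur hr
        (by simp_all [List.all_eq_true])]
      simp
    · have : cstep (cur, pend) c = (cur ++ pend ++ [c], []) := by
        simp [cstep, hc]
      rw [List.foldl_cons, this, ih (cur ++ pend ++ [c]) [] (by simp)
        (rstrip_append_nonws _ c hc) (by simp)]
      simp

-- leading whitespace is skipped while cur = []
theorem cstep_lstrip (p : List Char) :
    p.foldl cstep ([], []) = (p.dropWhile PySem.Chars.isspace).foldl cstep ([], []) := by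
  induction p with
  | nil => rfl
  | cons c p' ih =>
    by_cases hc : PySem.Chars.isspace c
    · have : cstep ([], []) c = ([], []) := by simp [cstep, hc]
      rw [List.foldl_cons, this, ih, List.dropWhile_cons_of_pos (by simp [hc])]
    · rw [List.dropWhile_cons_of_neg (by simp [hc])]

theorem dropWhile_head_false {α : Type} (p : α → Bool) (l : List α) :
    ∀ c q, l.dropWhile p = c :: q → p c = false := by
  induction l with
  | nil => intro c q h; simp at h
  | cons a r ih =>
    intro c q h
    by_cases ha : p a
    · rw [List.dropWhile_cons_of_pos ha] at h; exact ih c q h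
    · rw [List.dropWhile_cons_of_neg ha] at h
      cases h; simpa using ha

-- a full comma-free part from the empty state computes strip
theorem cstep_strip (p : List Char) :
    (p.foldl cstep ([], [])).1 = PySem.Chars.strip p := by
  rw [cstep_lstrip]
  unfold PySem.Chars.strip PySem.Chars.lstrip
  cases hq : p.dropWhile PySem.Chars.isspace with
  | nil => simp [PySem.Chars.rstrip]
  | cons c q' =>
    have hc : ¬ PySem.Chars.isspace c := by
      have hhd := dropWhile_head_false PySem.Chars.isspace p
      rw [hq] at hhd
      simpa using hhd c q' rfl
    have : cstep ([], []) c = ([c], []) := by simp [cstep, hc]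
    rw [List.foldl_cons, this,
      cstep_run q' [c] [] (by simp) (rstrip_append_nonws [] c hc) (by simp)]
    simp

-- emitted result for the remaining parts of the current token
def restEmit : List (List Char) → (List Char × List Char) → List String
  | [], _ => []
  | p :: rest, st => emitPart (p.foldl cstep st).1 ++ keepF rest

theorem restEmit_empty (ps : List (List Char)) : restEmit ps ([], []) = keepF ps := by
  cases ps with
  | nil => rfl
  | cons p rest =>
    simp only [restEmit, cstep_strip, keepF, List.map_cons, List.filter_cons, emitPart]
    have hb : PySem.Str.strip (String.ofList p) = String.ofList (PySem.Chars.strip p) := by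
      apply String.toList_injective
      simp [PySem.Str.toList_strip]
    rw [hb]
    by_cases h : PySem.Chars.strip p = []
    · simp only [h, ne_eq, not_true_eq_false, ite_false]
      simp [String.ofList]
      rfl
    · have : (String.ofList (PySem.Chars.strip p) != "") = true := by
        simp only [bne_iff_ne, ne_eq]
        intro hcontra
        exact h (by simpa using congrArg String.toList hcontra)
      simp [h, this]

-- running one token's characters through pystepB
theorem pystepB_run (l : List Char) (res : List String) (cur pend : List Char) :
    (let st := l.foldl pystepB (res, cur, pend)
     if st.2.1 ≠ [] then st.1 ++ [String.ofList st.2.1] else st.1) =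
      res ++ restEmit (split1 l) (cur, pend) := by
  induction l generalizing res cur pend with
  | nil =>
    simp only [List.foldl_nil, split1, restEmit, List.foldl_nil, emitPart, keepF]
    by_cases h : cur = [] <;> simp [h]
  | cons c r ih =>
    by_cases hc : c = ','
    · subst hc
      have hstep : pystepB (res, cur, pend) ',' =
          ((if cur ≠ [] then res ++ [String.ofList cur] else res), [], []) := by
        simp [pystepB]
      rw [List.foldl_cons, hstep, ih, restEmit_empty]
      have hs1 : split1 (',' :: r) = [] :: split1 r := by simp [split1]
      rw [hs1]
      simp only [restEmit, List.foldl_nil, emitPart]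
      by_cases h : cur = [] <;> simp [h, List.append_assoc]
    · have hstep : pystepB (res, cur, pend) c = (res, cstep (cur, pend) c) := by
        by_cases hw : PySem.Chars.isspace c <;> simp [pystepB, cstep, hc, hw]
      rw [List.foldl_cons, hstep, ih]
      have hs1 : ∃ p rest, split1 r = p :: rest := by
        cases h : split1 r with
        | nil => exact absurd h (split1_ne_nil r)
        | cons p rest => exact ⟨p, rest, rfl⟩
      obtain ⟨p, rest, hpr⟩ := hs1
      have hs2 : split1 (c :: r) = (c :: p) :: rest := by simp [split1, hc, hpr]
      rw [hpr, hs2]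
      simp [restEmit]

theorem B_eq (ts : List String) :
    parse_targets_from_list_alt ts = ts.flatMap (fun t => keepF (split1 t.toList)) := by
  unfold parse_targets_from_list_alt
  have hstep : ∀ (res : List String) (tok : String),
      (let st := tok.toList.foldl pystepB (res, [], [])
       if st.2.1 ≠ [] then st.1 ++ [String.ofList st.2.1] else st.1) =
        res ++ keepF (split1 tok.toList) := by
    intro res tok
    rw [pystepB_run, restEmit_empty]
  calc ts.foldl (fun results tok =>
        let st := tok.toList.foldl pystepB (results, [], [])
        if st.2.1 ≠ [] then st.1 ++ [String.ofList st.2.1] else st.1) []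
      = ts.foldl (fun results tok => results ++ keepF (split1 tok.toList)) [] := by
        apply PySem.List.foldl_congr_mem
        intro a b _; exact hstep a b
    _ = ts.flatMap (fun t => keepF (split1 t.toList)) := by
        rw [PySem.List.foldl_append_eq_flatMap]; simp

-- ===== VERDICT (by name: the statement is the Claim_ definition above) =====
theorem parse_targets_from_list_spec : Claim_equal_parse_targets_from_list := by
  intro ts _
  unfold Spec_parse_targets_from_list
  rw [A_eq, B_eq]
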